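-- pv_equiv track=rewrite | github.com/zetstr/bt-python | hello.py | boiTinhDuyen
-- ===== SOURCE A (Python) =====
-- def boiTinhDuyen(tenNam, tenNu):
--     #Tinh Toan
--     tenNam = tenNam.lower()
--     tenNu = tenNu.lower()
--     # ord chuyển đổi chữ cái thành số
--     dem = 0
--     for chuCai in range(ord('a'), ord('z') + 1):
--         if (chr(chuCai) in tenNam) and (chr(chuCai) in tenNu):
--             dem = dem + 1
--     if dem == 0:
--         return "Nguoi dung nuoc la"
--     elif dem < 3:
--         return "Cung duoc day"
--     else:
--         return "Toi luon de ban oi"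
-- ===== SOURCE B (Python) =====
-- def boiTinhDuyen(tenNam, tenNu):
--     nu = set(tenNu.lower())
--     common = {c for c in tenNam.lower() if 'a' <= c <= 'z' and c in nu}
--     dem = len(common)
--     if dem == 0:
--         return "Nguoi dung nuoc la"
--     elif dem < 3:
--         return "Cung duoc day"
--     else:
--         return "Toi luon de ban oi"
-- ===== Notes on version B (the rewrite author's own statement) =====
-- stated objective: simpler
-- what changed: Replaces the loop over all 26 alphabet letters with substring tests into both names by a single set comprehension over the first name's own characters intersected with the second name's character set.
import Mathlib
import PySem

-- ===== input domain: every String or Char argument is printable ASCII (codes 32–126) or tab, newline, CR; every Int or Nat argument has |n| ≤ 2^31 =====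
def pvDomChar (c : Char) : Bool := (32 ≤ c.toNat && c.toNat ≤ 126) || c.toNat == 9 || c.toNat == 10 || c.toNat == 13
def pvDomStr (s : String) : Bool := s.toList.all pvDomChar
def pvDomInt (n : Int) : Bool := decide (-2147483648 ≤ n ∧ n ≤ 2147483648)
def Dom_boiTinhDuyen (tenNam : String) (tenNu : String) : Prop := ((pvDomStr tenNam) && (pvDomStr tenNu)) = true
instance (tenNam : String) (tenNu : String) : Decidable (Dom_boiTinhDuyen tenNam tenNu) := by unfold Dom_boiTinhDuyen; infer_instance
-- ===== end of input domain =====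

-- B replaces A's loop over the 26 alphabet letters (substring tests into both names)
-- by one set comprehension over the first name's own characters; objective: simpler.
-- ===== PORT A =====
def boiTinhDuyen (tenNam : String) (tenNu : String) : String :=
  let tenNam' := PySem.Str.lower tenNam
  let tenNu' := PySem.Str.lower tenNu
  let dem : Int := (PySem.List.pyRange 97 123 1).foldl
    (fun dem chuCai =>
      if PySem.Str.isIn (String.ofList [Char.ofNat chuCai.toNat]) tenNam'
          && PySem.Str.isIn (String.ofList [Char.ofNat chuCai.toNat]) tenNu'
      then dem + 1 else dem) 0
  if dem = 0 then "Nguoi dung nuoc la"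
  else if dem < 3 then "Cung duoc day"
  else "Toi luon de ban oi"

-- ===== PORT B =====
def boiTinhDuyen_alt (tenNam : String) (tenNu : String) : String :=
  let nu : PySem.Set Char := PySem.Set.ofList (PySem.Str.lower tenNu).toList
  let common : PySem.Set Char := PySem.Set.ofList
    ((PySem.Str.lower tenNam).toList.filter
      (fun c => ('a' ≤ c && c ≤ 'z') && PySem.Set.contains nu c))
  let dem : Int := PySem.Set.len common
  if dem = 0 then "Nguoi dung nuoc la"
  else if dem < 3 then "Cung duoc day"
  else "Toi luon de ban oi"

-- ===== PRECONDITION & SPEC =====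
def Spec_boiTinhDuyen (tenNam : String) (tenNu : String) (out : String) : Prop := out = boiTinhDuyen_alt tenNam tenNu
instance (tenNam : String) (tenNu : String) (out : String) : Decidable (Spec_boiTinhDuyen tenNam tenNu out) := by unfold Spec_boiTinhDuyen; infer_instance

-- ===== CLAIM (what is proved, stated in full; the proofs are below) =====
def Claim_equal_boiTinhDuyen : Prop := ∀ (tenNam : String) (tenNu : String), Dom_boiTinhDuyen tenNam tenNu → Spec_boiTinhDuyen tenNam tenNu (boiTinhDuyen tenNam tenNu)

-- ===== LEMMAS AND PROOFS =====

-- single-character substring test = character membership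
theorem isIn_singleton (c : Char) (l : List Char) : PySem.Chars.isIn [c] l = true ↔ c ∈ l := by
  rw [PySem.Chars.isIn_iff_infix]
  exact ⟨fun h => h.mem (by simp), fun h => by
    obtain ⟨p, q, rfl⟩ := List.mem_iff_append.mp h
    exact ⟨p, q, by simp⟩⟩

theorem toNat_ofNat_lt (n : Nat) (h : n < 123) : (Char.ofNat n).toNat = n := by
  rw [Char.toNat_ofNat, if_pos (Or.inl (by omega))]

theorem le_a_iff (c : Char) : ('a' ≤ c) ↔ (97 ≤ c.toNat) := by
  rw [Char.le_def]; exact UInt32.le_iff_toNat_le ..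

theorem le_z_iff (c : Char) : (c ≤ 'z') ↔ (c.toNat ≤ 122) := by
  rw [Char.le_def]; exact UInt32.le_iff_toNat_le ..

-- the core count identity, stated on character lists
theorem count_eq (l1 l2 : List Char) :
    ((PySem.List.pyRange 97 123 1).foldl
      (fun d c => if PySem.Chars.isIn [Char.ofNat c.toNat] l1
                      && PySem.Chars.isIn [Char.ofNat c.toNat] l2 then d + 1 else d) (0 : Int))
    = ((PySem.Set.ofList (l1.filter
        (fun c => ('a' ≤ c && c ≤ 'z') && PySem.Set.contains (PySem.Set.ofList l2) c))).length : Int) := by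
  rw [PySem.List.foldl_if_add_one, zero_add]
  norm_cast
  rw [List.countP_eq_length_filter]
  set q : Int → Bool := fun c => PySem.Chars.isIn [Char.ofNat c.toNat] l1
      && PySem.Chars.isIn [Char.ofNat c.toNat] l2 with hq
  set p : Char → Bool := fun c => ('a' ≤ c && c ≤ 'z') && PySem.Set.contains (PySem.Set.ofList l2) c with hp
  have hmemA : ∀ c ∈ (PySem.List.pyRange 97 123 1).filter q, 97 ≤ c ∧ c < 123 := by
    intro c hc
    exact PySem.List.mem_pyRange_one.1 (List.mem_of_mem_filter hc)
  have hlen : (((PySem.List.pyRange 97 123 1).filter q).map (fun c => Char.ofNat c.toNat)).length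
      = ((PySem.List.pyRange 97 123 1).filter q).length := List.length_map ..
  rw [← hlen]
  apply List.Perm.length_eq
  rw [List.perm_ext_iff_of_nodup]
  · intro x
    constructor
    · intro hx
      obtain ⟨c, hc, rfl⟩ := List.mem_map.1 hx
      obtain ⟨hcm, hcq⟩ := List.mem_filter.1 hc
      obtain ⟨h1, h2⟩ := PySem.List.mem_pyRange_one.1 hcm
      have htn : (Char.ofNat c.toNat).toNat = c.toNat := toNat_ofNat_lt _ (by omega)
      simp only [hq, Bool.and_eq_true] at hcq
      obtain ⟨hq1, hq2⟩ := hcq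
      rw [isIn_singleton] at hq1 hq2
      refine (PySem.Set.mem_ofList _ _).2 (List.mem_filter.2 ⟨hq1, ?_⟩)
      simp only [hp, Bool.and_eq_true, decide_eq_true_eq]
      refine ⟨⟨?_, ?_⟩, (PySem.Set.contains_iff _ _).2 ((PySem.Set.mem_ofList _ _).2 hq2)⟩
      · exact ((le_a_iff (Char.ofNat c.toNat)).2 (by rw [htn]; omega))
      · exact ((le_z_iff (Char.ofNat c.toNat)).2 (by rw [htn]; omega))
    · intro hx
      obtain ⟨hx1, hxp⟩ := List.mem_filter.1 ((PySem.Set.mem_ofList _ _).1 hx)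
      simp only [hp, Bool.and_eq_true, decide_eq_true_eq] at hxp
      obtain ⟨⟨ha, hz⟩, hcont⟩ := hxp
      have ha' := (le_a_iff _).1 ha
      have hz' := (le_z_iff _).1 hz
      have hx2 : x ∈ l2 := (PySem.Set.mem_ofList _ _).1 ((PySem.Set.contains_iff _ _).1 hcont)
      refine List.mem_map.2 ⟨(x.toNat : Int), List.mem_filter.2 ⟨?_, ?_⟩, ?_⟩
      · exact PySem.List.mem_pyRange_one.2 ⟨by exact_mod_cast ha', by exact_mod_cast (by omega : x.toNat < 123)⟩
      · simp only [hq, Bool.and_eq_true, Int.toNat_natCast, Char.ofNat_toNat]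
        exact ⟨(isIn_singleton _ _).2 hx1, (isIn_singleton _ _).2 hx2⟩
      · simp [Char.ofNat_toNat]
  · refine List.Nodup.map_on ?_ (List.Nodup.filter _ (PySem.List.nodup_pyRange_one 97 123))
    intro a ha b hb hab
    obtain ⟨ha1, ha2⟩ := hmemA a ha
    obtain ⟨hb1, hb2⟩ := hmemA b hb
    have : a.toNat = b.toNat := by
      have h1 := toNat_ofNat_lt a.toNat (by omega)
      have h2 := toNat_ofNat_lt b.toNat (by omega)
      rw [← h1, ← h2, hab]
    omega
  · exact PySem.Set.nodup_ofList _

-- ===== VERDICT (by name: the statement is the Claim_ definition above) =====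
theorem boiTinhDuyen_spec : Claim_equal_boiTinhDuyen := by
  intro tenNam tenNu _
  unfold Spec_boiTinhDuyen boiTinhDuyen boiTinhDuyen_alt
  simp only [PySem.Str.isIn, PySem.Set.len, String.toList_ofList]
  rw [count_eq (PySem.Str.lower tenNam).toList (PySem.Str.lower tenNu).toList]
  rfl
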